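-- pv_equiv track=rewrite | github.com/datacommonsorg/data | tools/statvar_importer/property_value_utils.py | has_namespace
-- ===== SOURCE A (Python) =====
-- def has_namespace(value: str) -> bool:
--     """Checks if a value has a Data Commons namespace prefix.
--
--     A namespace prefix consists of one or more letters followed by a colon,
--     for example, "dcid:", "schema:", or "dcs:".
--
--     Args:
--         value: The string value to check.
--
--     Returns:
--         True if the value has a valid namespace prefix, False otherwise.
--
--     Examples:
--         >>> has_namespace("dcid:country/USA")
--         True
--         >>> has_namespace("schema:Person")
--         True
--         >>> has_namespace("country/USA")
--         False
--         >>> has_namespace("dcid:")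
--         True
--         >>> has_namespace(":no_namespace")
--         False
--         >>> has_namespace(None)
--         False
--     """
--     if not value or not isinstance(value, str):
--         return False
--     len_value = len(value)
--     pos = 0
--     while pos < len_value:
--         if not value[pos].isalpha():
--             break
--         pos += 1
--     if pos > 0 and pos < len_value and value[pos] == ':':
--         return True
--     return False
-- ===== SOURCE B (Python) =====
-- def has_namespace(value: str) -> bool:
--     if not value or not isinstance(value, str):
--         return False
--     i = value.find(':')
--     return i > 0 and value[:i].isalpha()
-- ===== Notes on version B (the rewrite author's own statement) =====
-- stated objective: simpler
-- what changed: Replaces A's manual char-by-char while-loop (advance while alpha, then check the stop char is ':') with a locate-then-validate pass: find the first colon and check the prefix before it is non-empty and all-alphabetic.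
import Mathlib
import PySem

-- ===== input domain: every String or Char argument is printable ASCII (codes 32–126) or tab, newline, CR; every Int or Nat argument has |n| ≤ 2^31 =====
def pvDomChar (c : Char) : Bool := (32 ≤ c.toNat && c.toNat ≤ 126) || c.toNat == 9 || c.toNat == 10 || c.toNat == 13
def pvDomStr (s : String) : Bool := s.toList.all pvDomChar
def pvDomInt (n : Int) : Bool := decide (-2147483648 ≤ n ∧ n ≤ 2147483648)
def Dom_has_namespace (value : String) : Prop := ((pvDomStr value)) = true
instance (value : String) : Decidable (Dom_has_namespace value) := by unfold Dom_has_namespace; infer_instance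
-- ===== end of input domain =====

-- B replaces A's manual advance-while-alpha scan by locate-the-first-colon-then-validate-the-prefix (objective: simpler).

-- ===== PORT A =====
-- the while loop: advance pos while value[pos] is alphabetic (pos < lenValue guards the index, so getD never uses its default)
def hnLoop (s : List Char) (lenValue pos : Nat) : Nat :=
  if pos < lenValue then
    if !(PySem.Chars.isalpha (s.getD pos ' ')) then pos
    else hnLoop s lenValue (pos + 1)
  else pos
termination_by lenValue - pos

def has_namespace (value : String) : Bool :=
  -- 'not value or not isinstance(value, str)': value is typed str here, so this is the emptiness test
  if value.toList = [] then false
  else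
    let lenValue := value.toList.length   -- len(value)
    let pos := hnLoop value.toList lenValue 0
    -- branch guarantees pos < lenValue, so getD never uses its default
    if pos > 0 && pos < lenValue && (value.toList.getD pos ' ' == ':') then true
    else false

-- ===== PORT B =====
def has_namespace_alt (value : String) : Bool :=
  if value.toList = [] then false
  else
    let i := PySem.Str.find value ":"
    decide (i > 0) && PySem.Chars.strIsalpha (PySem.Chars.slice value.toList none (some i))

-- ===== PRECONDITION & SPEC =====
def Spec_has_namespace (value : String) (out : Bool) : Prop := out = has_namespace_alt value
instance (value : String) (out : Bool) : Decidable (Spec_has_namespace value out) := by unfold Spec_has_namespace; infer_instance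

-- ===== CLAIM (what is proved, stated in full; the proofs are below) =====
def Claim_equal_has_namespace : Prop := ∀ (value : String), Dom_has_namespace value → Spec_has_namespace value (has_namespace value)

-- ===== LEMMAS AND PROOFS =====

theorem tw_getElem {α : Type} (p : α → Bool) (l : List α) (j : Nat)
    (hj : j < (l.takeWhile p).length) (hjl : j < l.length) :
    p (l[j]) = true := by
  have h := (List.takeWhile_prefix (l := l) p).getElem hj
  have hm : (l.takeWhile p)[j] ∈ l.takeWhile p := List.getElem_mem hj
  rw [h] at hm
  exact List.mem_takeWhile_imp hm

theorem tw_stop {α : Type} (p : α → Bool) (l : List α)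
    (h : (l.takeWhile p).length < l.length) :
    p (l[(l.takeWhile p).length]) = false := by
  induction l with
  | nil => simp at h
  | cons a tl ih =>
    by_cases hp : p a = true
    · simp only [List.takeWhile_cons, hp, if_true, List.length_cons] at h ⊢
      simpa using ih (by omega)
    · simp only [List.takeWhile_cons, hp] at h ⊢
      simp [List.length_nil] at h ⊢
      simpa using hp

theorem hnLoop_eq (s : List Char) (pos : Nat) :
    hnLoop s s.length pos = pos + ((s.drop pos).takeWhile PySem.Chars.isalpha).length := by
  unfold hnLoop
  by_cases h : pos < s.length
  · have hd : s.drop pos = s[pos] :: s.drop (pos + 1) := List.drop_eq_getElem_cons h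
    have hgd : s.getD pos ' ' = s[pos] := List.getD_eq_getElem s ' ' h
    by_cases hp : PySem.Chars.isalpha s[pos] = true
    · simp only [h, if_true, hgd, hp, Bool.not_true, Bool.false_eq_true, if_false]
      rw [hnLoop_eq s (pos + 1), hd, List.takeWhile_cons, if_pos hp]
      simp; omega
    · simp only [h, if_true, hgd, Bool.not_eq_true'] at *
      simp only [hp, if_true]
      rw [hd, List.takeWhile_cons, if_neg (by simp [hp])]
      simp
  · have : s.drop pos = [] := List.drop_eq_nil_of_le (by omega)
    simp [h, this]
termination_by s.length - pos

theorem singleton_prefix_drop (l : List Char) (c : Char) (j : Nat) :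
    ([c] <+: l.drop j) ↔ (j < l.length ∧ l[j]? = some c) := by
  constructor
  · rintro ⟨t, ht⟩
    have hlen : j < l.length := by
      by_contra hc
      have : l.drop j = [] := List.drop_eq_nil_of_le (by omega)
      rw [this] at ht; simp at ht
    refine ⟨hlen, ?_⟩
    have hd : l.drop j = l[j] :: l.drop (j + 1) := List.drop_eq_getElem_cons hlen
    rw [hd] at ht
    simp only [List.cons_append, List.cons.injEq] at ht
    simp [List.getElem?_eq_getElem hlen, ht.1]
  · rintro ⟨hlen, hc⟩
    have hd : l.drop j = l[j] :: l.drop (j + 1) := List.drop_eq_getElem_cons hlen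
    rw [List.getElem?_eq_getElem hlen] at hc
    simp only [Option.some.injEq] at hc
    exact ⟨l.drop (j + 1), by rw [hd, hc]; rfl⟩

-- the colon character is not alphabetic
theorem colon_not_alpha : PySem.Chars.isalpha ':' = false := by decide

-- find cs [':'] = t when the takeWhile-stop position t holds a colon
theorem find_eq_stop (cs : List Char)
    (ht : (cs.takeWhile PySem.Chars.isalpha).length < cs.length)
    (hc : cs[(cs.takeWhile PySem.Chars.isalpha).length] = ':') :
    PySem.Chars.find cs [':'] = ((cs.takeWhile PySem.Chars.isalpha).length : Int) := by
  set t := (cs.takeWhile PySem.Chars.isalpha).length with hT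
  have hocc : [':'] <+: cs.drop t := by
    rw [singleton_prefix_drop]
    exact ⟨ht, by rw [List.getElem?_eq_getElem ht]; exact congrArg some hc⟩
  have hnn : 0 ≤ PySem.Chars.find cs [':'] := by
    rw [PySem.Chars.find_nonneg_iff]
    exact ⟨cs.take t, cs.drop (t + 1), by
      have := List.drop_eq_getElem_cons ht
      rw [← hc]
      rw [show cs.take t ++ [cs[t]] ++ cs.drop (t+1) = cs.take t ++ (cs[t] :: cs.drop (t+1)) by simp
        , ← this, List.take_append_drop]⟩
  obtain ⟨hpre, hmin⟩ := PySem.Chars.find_spec hnn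
  set f := (PySem.Chars.find cs [':']).toNat with hF
  have hfc : cs[f]? = some ':' := ((singleton_prefix_drop cs ':' f).mp hpre).2
  have hflen : f < cs.length := ((singleton_prefix_drop cs ':' f).mp hpre).1
  have hft : f = t := by
    rcases Nat.lt_trichotomy f t with h | h | h
    · exfalso
      have halpha := tw_getElem PySem.Chars.isalpha cs f h hflen
      rw [List.getElem?_eq_getElem hflen] at hfc
      simp only [Option.some.injEq] at hfc
      rw [hfc, colon_not_alpha] at halpha; exact absurd halpha (by simp)
    · exact h
    · exact absurd hocc (hmin t h)
  omega

theorem hn_eq_alt (value : String) : has_namespace value = has_namespace_alt value := by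
  unfold has_namespace has_namespace_alt
  by_cases hnil : value.toList = []
  · simp [hnil]
  · simp only [hnil, if_false]
    set cs := value.toList with hcs
    rw [hnLoop_eq cs 0]
    simp only [List.drop_zero, Nat.zero_add]
    set t := (cs.takeWhile PySem.Chars.isalpha).length with hT
    by_cases hA : 0 < t ∧ t < cs.length ∧ cs.getD t ' ' = ':'
    · obtain ⟨h0, hlt, hcol⟩ := hA
      rw [List.getD_eq_getElem cs ' ' hlt] at hcol
      have hf : PySem.Chars.find cs [':'] = (t : Int) := find_eq_stop cs hlt hcol
      have hBl : decide ((PySem.Str.find value ":") > 0) = true := by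
        simp [PySem.Str.find, ← hcs, hf]; omega
      have hBr : PySem.Chars.strIsalpha (PySem.Chars.slice cs none (some (PySem.Str.find value ":"))) = true := by
        have : PySem.Str.find value ":" = (t : Int) := by simp [PySem.Str.find, ← hcs, hf]
        rw [this, PySem.Chars.slice_eq_listSlice, PySem.List.slice_to cs (by positivity)]
        rw [Int.toNat_natCast]
        have htake : cs.take t = cs.takeWhile PySem.Chars.isalpha :=
          (List.prefix_iff_eq_take.mp (List.takeWhile_prefix _)).symm
        rw [htake]
        unfold PySem.Chars.strIsalpha
        have hne : (cs.takeWhile PySem.Chars.isalpha).isEmpty = false := by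
          rw [List.isEmpty_eq_false_iff]
          intro hE; rw [hE] at hT; simp at hT; omega
        simp only [hne, Bool.not_false, Bool.true_and, List.all_eq_true]
        exact fun x hx => List.mem_takeWhile_imp hx
      rw [hBl, hBr]
      simp only [Bool.and_self]
      rw [if_pos]
      simp [h0, hlt, List.getD_eq_getElem cs ' ' hlt, hcol]
    · -- A is false; show B is false too
      rw [if_neg (by
        intro hc
        simp only [Bool.and_eq_true, decide_eq_true_eq, beq_iff_eq] at hc
        exact hA ⟨hc.1.1, hc.1.2, hc.2⟩)]
      by_contra hB
      simp only [Bool.and_eq_true, decide_eq_true_eq] at hB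
      obtain ⟨hf0, hiso⟩ := (Bool.and_eq_true _ _).mp (Bool.of_not_eq_false (by
        intro h; rw [h] at hB; exact hB rfl))
      clear hB
      rw [decide_eq_true_eq] at hf0
      -- f > 0, prefix before f all alpha and nonempty
      have hnn : 0 ≤ PySem.Str.find value ":" := le_of_lt hf0
      simp only [PySem.Str.find, ← hcs] at hnn hf0 hiso
      obtain ⟨hpre, hmin⟩ := PySem.Chars.find_spec (s := cs) (sub := (":" : String).toList) (by simpa using hnn)
      set f := (PySem.Chars.find cs (":").toList).toNat with hF
      have hcolon : (":" : String).toList = [':'] := rfl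
      rw [hcolon] at hpre hmin
      obtain ⟨hflen, hfc⟩ := (singleton_prefix_drop cs ':' f).mp hpre
      rw [List.getElem?_eq_getElem hflen] at hfc
      simp only [Option.some.injEq] at hfc
      have hfpos : 0 < f := by
        simp only [hcolon] at hf0 hF
        omega
      -- slice value[:f] = take f cs, all alpha and nonempty
      have hslice : PySem.Chars.slice cs none (some (PySem.Chars.find cs (":").toList)) = cs.take f := by
        rw [PySem.Chars.slice_eq_listSlice, PySem.List.slice_to cs (by simpa using hnn)]
      rw [hslice] at hiso
      unfold PySem.Chars.strIsalpha at hiso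
      simp only [Bool.and_eq_true, List.all_eq_true] at hiso
      have halpha : ∀ j (hj : j < f) (hjl : j < cs.length), PySem.Chars.isalpha cs[j] = true := by
        intro j hj hjl
        exact hiso.2 cs[j] (by
          rw [List.mem_take_iff_getElem]
          exact ⟨j, by omega, by simp⟩)
      -- all of 0..f-1 alpha and cs[f] = ':' not alpha ⇒ t = f
      have htf : t = f := by
        rcases Nat.lt_trichotomy t f with h | h | h
        · exfalso
          have h1 := halpha t h (by omega)
          have h2 : PySem.Chars.isalpha cs[t] = false := tw_stop PySem.Chars.isalpha cs (by omega)
          simpa using h1.symm.trans h2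
        · exact h
        · exfalso
          have h1 := tw_getElem PySem.Chars.isalpha cs f h hflen
          rw [hfc, colon_not_alpha] at h1; exact absurd h1 (by simp)
      refine hA ⟨by omega, by omega, ?_⟩
      rw [List.getD_eq_getElem cs ' ' (by omega)]
      have hq : cs[t]? = cs[f]? := by rw [htf]
      rw [List.getElem?_eq_getElem (show t < cs.length by omega), List.getElem?_eq_getElem hflen, hfc] at hq
      simpa using hq

-- ===== VERDICT (by name: the statement is the Claim_ definition above) =====
theorem has_namespace_spec : Claim_equal_has_namespace := by
  intro value _
  unfold Spec_has_namespace
  exact hn_eq_alt value
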